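-- pv_equiv track=rewrite | github.com/LoganFriedrich/MouseReach | training/analyze_frame_features.py | match_reaches
-- ===== SOURCE A (Python) =====
-- def match_reaches(gt_reaches, algo_reaches, max_dist=30):
--     """Match GT reaches to algo reaches by start frame proximity (1:1 greedy)."""
--     candidates = []
--     for gi, gr in enumerate(gt_reaches):
--         gt_start = gr['start_frame']
--         for ai, ar in enumerate(algo_reaches):
--             a_start = ar.get('start_frame', 0)
--             dist = abs(gt_start - a_start)
--             if dist <= max_dist:
--                 candidates.append((dist, gi, ai))
--
--     candidates.sort()
--     gt_used = set()
--     algo_used = set()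
--     matches = []
--
--     for dist, gi, ai in candidates:
--         if gi not in gt_used and ai not in algo_used:
--             gt_used.add(gi)
--             algo_used.add(ai)
--             matches.append((gi, ai, dist))
--
--     return matches
-- ===== SOURCE B (Python) =====
-- def match_reaches(gt_reaches, algo_reaches, max_dist=30):
--     """Match GT reaches to algo reaches by start frame proximity (1:1),
--     by repeated minimum extraction: take the best remaining candidate pair,
--     record it, then discard every pair that conflicts with it.
--     No sort and no used-sets are needed."""
--     pairs = [(abs(gr['start_frame'] - ar.get('start_frame', 0)), gi, ai)
--              for gi, gr in enumerate(gt_reaches)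
--              for ai, ar in enumerate(algo_reaches)
--              if abs(gr['start_frame'] - ar.get('start_frame', 0)) <= max_dist]
--     matches = []
--     while pairs:
--         dist, gi, ai = min(pairs)
--         matches.append((gi, ai, dist))
--         pairs = [p for p in pairs if p[1] != gi and p[2] != ai]
--     return matches
-- ===== Notes on version B (the rewrite author's own statement) =====
-- stated objective: alternative
-- what changed: Replaces sort-then-scan with used-sets by selection-based greedy: repeatedly extract min(pairs) and delete every pair sharing its gt or algo index, so no sort and no used-sets exist.
import Mathlib
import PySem

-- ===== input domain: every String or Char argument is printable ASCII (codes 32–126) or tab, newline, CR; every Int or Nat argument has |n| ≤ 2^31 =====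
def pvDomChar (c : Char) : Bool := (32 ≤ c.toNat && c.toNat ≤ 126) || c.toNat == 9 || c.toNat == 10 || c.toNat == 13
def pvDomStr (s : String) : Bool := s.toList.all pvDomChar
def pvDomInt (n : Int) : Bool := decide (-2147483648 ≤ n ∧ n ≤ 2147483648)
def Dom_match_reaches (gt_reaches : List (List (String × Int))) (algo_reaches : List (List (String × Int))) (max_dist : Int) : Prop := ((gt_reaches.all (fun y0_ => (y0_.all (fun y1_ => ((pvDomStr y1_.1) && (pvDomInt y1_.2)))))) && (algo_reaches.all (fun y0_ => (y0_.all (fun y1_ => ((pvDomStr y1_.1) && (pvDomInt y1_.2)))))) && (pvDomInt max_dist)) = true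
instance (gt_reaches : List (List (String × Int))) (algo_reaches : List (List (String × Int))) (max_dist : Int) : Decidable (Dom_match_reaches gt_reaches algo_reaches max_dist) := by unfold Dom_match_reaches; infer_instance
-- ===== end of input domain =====

-- B replaces A's sort-then-scan-with-used-sets by selection-based greedy: it repeatedly
-- extracts min(pairs) and deletes every pair sharing its gt or algo index, so it needs
-- no sort and no used-sets (objective: alternative algorithm, same greedy 1:1 result).

-- ===== PORT A =====
-- first-match association-list lookup (= Python dict lookup under the type convention)
def pvLookup (d : List (String × Int)) (k : String) : Option Int :=
  match d with
  | [] => none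
  | (k', v) :: t => if k' = k then some v else pvLookup t k

-- gr['start_frame'] raises KeyError when absent — those inputs are outside Pre_;
-- the .getD 0 default is never reached inside Pre_.  ar.get('start_frame', 0) is exact.
def pvStart (r : List (String × Int)) : Int := (pvLookup r "start_frame").getD 0

-- Python compares the (dist, gi, ai) tuples lexicographically: this key realises that order.
def pvKeyA (c : Int × Int × Int) : Lex (Int × Lex (Int × Int)) := toLex (c.1, toLex (c.2.1, c.2.2))

def match_reaches (gt_reaches : List (List (String × Int))) (algo_reaches : List (List (String × Int))) (max_dist : Int) : List (Int × Int × Int) :=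
  let candidates : List (Int × Int × Int) :=
    (PySem.List.enumerate gt_reaches 0).foldl (fun acc g =>
      (PySem.List.enumerate algo_reaches 0).foldl (fun acc a =>
        if |pvStart g.2 - pvStart a.2| ≤ max_dist then
          acc ++ [(|pvStart g.2 - pvStart a.2|, g.1, a.1)]
        else acc) acc) []
  let st := (PySem.List.sorted candidates pvKeyA false).foldl
      (fun st c =>
        if !st.1.contains c.2.1 && !st.2.1.contains c.2.2 then
          (st.1.add c.2.1, st.2.1.add c.2.2, st.2.2 ++ [(c.2.1, c.2.2, c.1)])
        else st)
      ((PySem.Set.empty : PySem.Set Int), (PySem.Set.empty : PySem.Set Int), ([] : List (Int × Int × Int)))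
  st.2.2

-- ===== PORT B =====
-- the while loop of Source B: min(pairs) is PySem.List.min? with the tuple-lex key;
-- each round appends the pick to matches and keeps only non-conflicting pairs
def pvSelLoop (pairs : List (Int × Int × Int)) (ms : List (Int × Int × Int)) : List (Int × Int × Int) :=
  match h : PySem.List.min? pairs pvKeyA with
  | none => ms
  | some m =>
      pvSelLoop (pairs.filter (fun p => decide (p.2.1 ≠ m.2.1) && decide (p.2.2 ≠ m.2.2)))
        (ms ++ [(m.2.1, m.2.2, m.1)])
termination_by pairs.length
decreasing_by
  have hm := PySem.List.min?_mem h
  simp only [List.length_unattach]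
  rw [← List.length_attach (l := pairs)]
  exact List.length_filter_lt_length_iff_exists.mpr ⟨⟨m, hm⟩, List.mem_attach _ _, by simp⟩

def match_reaches_alt (gt_reaches : List (List (String × Int))) (algo_reaches : List (List (String × Int))) (max_dist : Int) : List (Int × Int × Int) :=
  let pairs : List (Int × Int × Int) :=
    (PySem.List.enumerate gt_reaches 0).flatMap (fun g =>
      ((PySem.List.enumerate algo_reaches 0).filter
          (fun a => decide (|pvStart g.2 - pvStart a.2| ≤ max_dist))).map
        (fun a => (|pvStart g.2 - pvStart a.2|, g.1, a.1)))
  pvSelLoop pairs []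

-- ===== PRECONDITION & SPEC =====
-- Pre_ excludes exactly the inputs where some gt dict lacks the key 'start_frame':
-- there A (gr['start_frame']) raises KeyError — and so does B.
def Pre_match_reaches (gt_reaches : List (List (String × Int))) (algo_reaches : List (List (String × Int))) (max_dist : Int) : Prop :=
  gt_reaches.all (fun gr => gr.any (fun kv => kv.1 == "start_frame")) = true
instance (gt_reaches : List (List (String × Int))) (algo_reaches : List (List (String × Int))) (max_dist : Int) : Decidable (Pre_match_reaches gt_reaches algo_reaches max_dist) := by unfold Pre_match_reaches; infer_instance

def pvWitness_match_reaches : (List (List (String × Int))) × (List (List (String × Int))) × Int :=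
  ([[("start_frame", 3)], [("start_frame", 40)]], [[("start_frame", 5)], []], 30)

def Spec_match_reaches (gt_reaches : List (List (String × Int))) (algo_reaches : List (List (String × Int))) (max_dist : Int) (out : List (Int × Int × Int)) : Prop := out = match_reaches_alt gt_reaches algo_reaches max_dist
instance (gt_reaches : List (List (String × Int))) (algo_reaches : List (List (String × Int))) (max_dist : Int) (out : List (Int × Int × Int)) : Decidable (Spec_match_reaches gt_reaches algo_reaches max_dist out) := by unfold Spec_match_reaches; infer_instance

-- ===== CLAIM (what is proved, stated in full; the proofs are below) =====
def Claim_equal_match_reaches : Prop := ∀ (gt_reaches : List (List (String × Int))) (algo_reaches : List (List (String × Int))) (max_dist : Int), Dom_match_reaches gt_reaches algo_reaches max_dist → Pre_match_reaches gt_reaches algo_reaches max_dist → Spec_match_reaches gt_reaches algo_reaches max_dist (match_reaches gt_reaches algo_reaches max_dist)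

-- ===== LEMMAS AND PROOFS =====

-- the common candidate stream, in enumeration order
def pvCands (gt_reaches algo_reaches : List (List (String × Int))) (max_dist : Int) : List (Int × Int × Int) :=
  (PySem.List.enumerate gt_reaches 0).flatMap (fun g =>
    ((PySem.List.enumerate algo_reaches 0).filter
        (fun a => decide (|pvStart g.2 - pvStart a.2| ≤ max_dist))).map
      (fun a => (|pvStart g.2 - pvStart a.2|, g.1, a.1)))

theorem pv_candsA (gt_reaches algo_reaches : List (List (String × Int))) (max_dist : Int) :
    (PySem.List.enumerate gt_reaches 0).foldl (fun acc g =>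
      (PySem.List.enumerate algo_reaches 0).foldl (fun acc a =>
        if |pvStart g.2 - pvStart a.2| ≤ max_dist then
          acc ++ [(|pvStart g.2 - pvStart a.2|, g.1, a.1)]
        else acc) acc) []
    = pvCands gt_reaches algo_reaches max_dist := by
  unfold pvCands
  rw [← List.nil_append (List.flatMap _ _), ← PySem.List.foldl_append_eq_flatMap]
  apply PySem.List.foldl_congr_mem
  intro acc g _
  exact PySem.List.foldl_append_ite _ _ _ _

def pvStep (st : PySem.Set Int × PySem.Set Int × List (Int × Int × Int)) (c : Int × Int × Int) :
    PySem.Set Int × PySem.Set Int × List (Int × Int × Int) :=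
  if !st.1.contains c.2.1 && !st.2.1.contains c.2.2 then
    (st.1.add c.2.1, st.2.1.add c.2.2, st.2.2 ++ [(c.2.1, c.2.2, c.1)])
  else st

def pvInit : PySem.Set Int × PySem.Set Int × List (Int × Int × Int) :=
  (PySem.Set.empty, PySem.Set.empty, [])

theorem pv_A_eq (gt_reaches algo_reaches : List (List (String × Int))) (max_dist : Int) :
    match_reaches gt_reaches algo_reaches max_dist
    = ((PySem.List.sorted (pvCands gt_reaches algo_reaches max_dist) pvKeyA false).foldl
        pvStep pvInit).2.2 := by
  unfold match_reaches
  simp only [pv_candsA]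
  rfl

def pvLt2 (a b : Int × Int × Int) : Prop :=
  a.2.1 < b.2.1 ∨ (a.2.1 = b.2.1 ∧ a.2.2 < b.2.2)

-- the candidate stream is strictly increasing in (gi, ai)
theorem pv_cands_pairwise (gt_reaches algo_reaches : List (List (String × Int))) (max_dist : Int) :
    (pvCands gt_reaches algo_reaches max_dist).Pairwise pvLt2 := by
  unfold pvCands
  rw [List.flatMap_def, List.pairwise_flatten]
  constructor
  · intro lb hlb
    rcases List.mem_map.mp hlb with ⟨g, _, rfl⟩
    rw [List.pairwise_map]
    have h1 : (PySem.List.enumerate algo_reaches 0).Pairwise (fun p q => p.1 < q.1) :=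
      PySem.List.pairwise_lt_enumerate _ _
    exact (h1.sublist (List.filter_sublist)).imp (fun h => Or.inr ⟨rfl, h⟩)
  · rw [List.pairwise_map]
    have h1 : (PySem.List.enumerate gt_reaches 0).Pairwise (fun p q => p.1 < q.1) :=
      PySem.List.pairwise_lt_enumerate _ _
    refine h1.imp ?_
    intro g1 g2 hlt x hx y hy
    rcases List.mem_map.mp hx with ⟨a1, _, rfl⟩
    rcases List.mem_map.mp hy with ⟨a2, _, rfl⟩
    exact Or.inl hlt

theorem pv_lt2_key_ne {a b : Int × Int × Int} (h : pvLt2 a b) : pvKeyA a ≠ pvKeyA b := by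
  intro he
  have h1 : a.1 = b.1 ∧ a.2 = b.2 := by simpa [pvKeyA, Prod.ext_iff] using he
  have h21 : a.2.1 = b.2.1 := by rw [h1.2]
  have h22 : a.2.2 = b.2.2 := by rw [h1.2]
  rcases h with hlt | ⟨he1, hlt⟩ <;> omega

-- min? of a strictly key-sorted list is its head
theorem pv_min?_sorted (l : List (Int × Int × Int))
    (hl : l.Pairwise (fun a b => pvKeyA a < pvKeyA b)) :
    PySem.List.min? l pvKeyA = l.head? := by
  cases l with
  | nil => rfl
  | cons c t =>
    rcases hm : PySem.List.min? (c :: t) pvKeyA with _ | m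
    · exact absurd ((PySem.List.min?_eq_none_iff _ _).mp hm) (by simp)
    · have hmem := PySem.List.min?_mem hm
      have hle := PySem.List.min?_isMin hm c (by simp)
      rcases List.mem_cons.mp hmem with rfl | ht
      · rfl
      · have := (List.pairwise_cons.mp hl).1 m ht
        exact absurd hle (not_le.mpr this)

-- one unfolding of pvSelLoop in each of its two cases
theorem pvSelLoop_none (pairs ms : List (Int × Int × Int))
    (h : PySem.List.min? pairs pvKeyA = none) : pvSelLoop pairs ms = ms := by
  rw [pvSelLoop.eq_def]
  split <;> simp_all

theorem pvSelLoop_some (pairs ms : List (Int × Int × Int)) (m : Int × Int × Int)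
    (h : PySem.List.min? pairs pvKeyA = some m) :
    pvSelLoop pairs ms
      = pvSelLoop (pairs.filter (fun p => decide (p.2.1 ≠ m.2.1) && decide (p.2.2 ≠ m.2.2)))
          (ms ++ [(m.2.1, m.2.2, m.1)]) := by
  rw [pvSelLoop.eq_def]
  split <;> simp_all

-- membership in a PySem.Set after add / empty, as Bool contains
theorem pv_contains_add (s : PySem.Set Int) (x y : Int) :
    (s.add x).contains y = (s.contains y || y == x) := by
  by_cases hx : x ∈ s <;> by_cases hy : y ∈ s <;> by_cases hyx : y = x <;>
    simp_all [PySem.Set.add, PySem.Set.contains]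

-- MAIN: the used-set greedy over a strictly key-sorted list equals selection-based greedy
-- on its pairs not yet blocked by the sets
theorem pv_main (l : List (Int × Int × Int))
    (hl : l.Pairwise (fun a b => pvKeyA a < pvKeyA b)) :
    ∀ (G A : PySem.Set Int) (acc : List (Int × Int × Int)),
    (l.foldl pvStep (G, A, acc)).2.2
      = pvSelLoop (l.filter (fun p => !G.contains p.2.1 && !A.contains p.2.2)) acc := by
  induction l with
  | nil =>
    intro G A acc
    simp [pvSelLoop_none [] acc rfl]
  | cons c t ih =>
    intro G A acc
    have ht := (List.pairwise_cons.mp hl).2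
    have hct := (List.pairwise_cons.mp hl).1
    by_cases hc : (!G.contains c.2.1 && !A.contains c.2.2) = true
    · -- c is taken by both sides
      have hfil : (c :: t).filter (fun p => !G.contains p.2.1 && !A.contains p.2.2)
          = c :: t.filter (fun p => !G.contains p.2.1 && !A.contains p.2.2) :=
        List.filter_cons_of_pos hc
      have hmin : PySem.List.min?
          (c :: t.filter (fun p => !G.contains p.2.1 && !A.contains p.2.2)) pvKeyA
          = some c := by
        rw [pv_min?_sorted]
        · rfl
        · exact List.pairwise_cons.mpr
            ⟨fun b hb => hct b (List.mem_of_mem_filter hb),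
             ht.sublist (List.filter_sublist)⟩
      have hff : (t.filter (fun p => !G.contains p.2.1 && !A.contains p.2.2)).filter
            (fun p => decide (p.2.1 ≠ c.2.1) && decide (p.2.2 ≠ c.2.2))
          = t.filter (fun p => !(G.add c.2.1).contains p.2.1 && !(A.add c.2.2).contains p.2.2) := by
        rw [List.filter_filter]
        apply List.filter_congr
        intro p _
        rw [pv_contains_add, pv_contains_add]
        by_cases h1 : p.2.1 ∈ G <;> by_cases h2 : p.2.2 ∈ A <;>
          by_cases h3 : p.2.1 = c.2.1 <;> by_cases h4 : p.2.2 = c.2.2 <;>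
          simp [PySem.Set.contains, h1, h2, h3, h4]
      have hstep : pvStep (G, A, acc) c
          = (G.add c.2.1, A.add c.2.2, acc ++ [(c.2.1, c.2.2, c.1)]) := by
        unfold pvStep
        rw [if_pos hc]
      rw [hfil, pvSelLoop_some _ _ _ hmin, List.filter_cons]
      simp only [show (decide (c.2.1 ≠ c.2.1) && decide (c.2.2 ≠ c.2.2)) = false by simp]
      rw [hff, List.foldl_cons, hstep]
      exact ih ht _ _ _
    · -- c is blocked: skipped by both sides
      have hfil : (c :: t).filter (fun p => !G.contains p.2.1 && !A.contains p.2.2)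
          = t.filter (fun p => !G.contains p.2.1 && !A.contains p.2.2) :=
        List.filter_cons_of_neg (by simpa using hc)
      have hstep : pvStep (G, A, acc) c = (G, A, acc) := by
        unfold pvStep
        rw [if_neg hc]
      rw [hfil, List.foldl_cons, hstep]
      exact ih ht _ _ _

-- selection-based greedy is invariant under permutation when the keys are distinct
theorem pv_selLoop_perm :
    ∀ (n : Nat) (l l' acc : List (Int × Int × Int)), l.length ≤ n → l.Perm l' →
    (l.map pvKeyA).Nodup → pvSelLoop l acc = pvSelLoop l' acc := by
  intro n
  induction n with
  | zero =>
    intro l l' acc hn hperm _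
    have h0 : l = [] := List.eq_nil_of_length_eq_zero (Nat.le_zero.mp hn)
    subst h0
    have h1 : l' = [] := hperm.symm.eq_nil
    subst h1
    rfl
  | succ n ih =>
    intro l l' acc hn hperm hnd
    rcases hm : PySem.List.min? l pvKeyA with _ | m
    · have h0 : l = [] := (PySem.List.min?_eq_none_iff _ _).mp hm
      subst h0
      have h1 : l' = [] := hperm.symm.eq_nil
      subst h1
      rfl
    · rcases hm' : PySem.List.min? l' pvKeyA with _ | m'
      · have h1 : l' = [] := (PySem.List.min?_eq_none_iff _ _).mp hm'
        subst h1
        have h0 : l = [] := hperm.eq_nil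
        subst h0
        simp [PySem.List.min?] at hm
      · have hmem := PySem.List.min?_mem hm
        have hmem' := hperm.mem_iff.mpr (PySem.List.min?_mem hm')
        have hkey : pvKeyA m = pvKeyA m' :=
          le_antisymm (PySem.List.min?_isMin hm m' hmem')
            (PySem.List.min?_isMin hm' m (hperm.mem_iff.mp hmem))
        have hmm : m = m' := List.inj_on_of_nodup_map hnd hmem hmem' hkey
        subst hmm
        rw [pvSelLoop_some _ _ _ hm, pvSelLoop_some _ _ _ hm']
        apply ih
        · have hlt : (l.filter (fun p => decide (p.2.1 ≠ m.2.1) && decide (p.2.2 ≠ m.2.2))).length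
              < l.length :=
            List.length_filter_lt_length_iff_exists.mpr ⟨m, hmem, by simp⟩
          omega
        · exact hperm.filter _
        · exact List.Nodup.sublist ((List.filter_sublist).map pvKeyA) hnd

theorem pv_cands_keys_nodup (gt_reaches algo_reaches : List (List (String × Int))) (max_dist : Int) :
    ((pvCands gt_reaches algo_reaches max_dist).map pvKeyA).Nodup := by
  unfold List.Nodup
  rw [List.pairwise_map]
  exact (pv_cands_pairwise gt_reaches algo_reaches max_dist).imp (fun h => pv_lt2_key_ne h)

-- the sorted candidate list is strictly increasing in pvKeyA (the keys are all distinct)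
theorem pv_sorted_strict (gt_reaches algo_reaches : List (List (String × Int))) (max_dist : Int) :
    (PySem.List.sorted (pvCands gt_reaches algo_reaches max_dist) pvKeyA false).Pairwise
      (fun a b => pvKeyA a < pvKeyA b) := by
  have hperm := PySem.List.sorted_perm (pvCands gt_reaches algo_reaches max_dist) pvKeyA false
  have hle := PySem.List.sorted_pairwise (pvCands gt_reaches algo_reaches max_dist) pvKeyA
  have hnd : ((PySem.List.sorted (pvCands gt_reaches algo_reaches max_dist) pvKeyA false).map
      pvKeyA).Nodup :=
    ((hperm.map pvKeyA).symm).nodup (pv_cands_keys_nodup gt_reaches algo_reaches max_dist)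
  have hne : (PySem.List.sorted (pvCands gt_reaches algo_reaches max_dist) pvKeyA false).Pairwise
      (fun a b => pvKeyA a ≠ pvKeyA b) := by
    have := hnd
    unfold List.Nodup at this
    rwa [List.pairwise_map] at this
  exact (hle.and hne).imp (fun h => lt_of_le_of_ne h.1 h.2)

-- ===== VERDICT (by name: the statement is the Claim_ definition above) =====
theorem match_reaches_spec : Claim_equal_match_reaches := by
  intro gt_reaches algo_reaches max_dist _ _
  unfold Spec_match_reaches
  rw [pv_A_eq]
  unfold pvInit
  rw [pv_main _ (pv_sorted_strict gt_reaches algo_reaches max_dist) PySem.Set.empty PySem.Set.empty []]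
  have hfilt : (PySem.List.sorted (pvCands gt_reaches algo_reaches max_dist) pvKeyA false).filter
      (fun p => !(PySem.Set.empty : PySem.Set Int).contains p.2.1
        && !(PySem.Set.empty : PySem.Set Int).contains p.2.2)
      = PySem.List.sorted (pvCands gt_reaches algo_reaches max_dist) pvKeyA false := by
    apply List.filter_eq_self.mpr
    intro p _
    rfl
  rw [hfilt]
  rw [pv_selLoop_perm (PySem.List.sorted (pvCands gt_reaches algo_reaches max_dist) pvKeyA false).length
      _ (pvCands gt_reaches algo_reaches max_dist) [] le_rfl
      (PySem.List.sorted_perm (pvCands gt_reaches algo_reaches max_dist) pvKeyA false)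
      (((PySem.List.sorted_perm (pvCands gt_reaches algo_reaches max_dist) pvKeyA false).map
          pvKeyA).symm.nodup (pv_cands_keys_nodup gt_reaches algo_reaches max_dist))]
  rfl
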